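-- pv_equiv track=rewrite | github.com/szmuschi/Python | Lab2/src/10.py | ex_10
-- ===== SOURCE A (Python) =====
-- def ex_10(a):
--     n, m = len(a), len(a[0])
--     result = []
--     for i in range(n):
--         for j in range(m):
--             for k in range(i):
--                 if a[k][j] >= a[i][j]:
--                     result.append((i, j))
--                     break
--     return result
-- ===== SOURCE B (Python) =====
-- def ex_10(a):
--     # Running per-column maxima: one pass over the rows instead of rescanning all earlier rows per cell.
--     maxes = list(a[0])
--     result = []
--     for i in range(1, len(a)):
--         pairs = list(zip(maxes, a[i]))
--         result.extend((i, j) for j, (mx, v) in enumerate(pairs) if mx >= v)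
--         maxes = [max(mx, v) for mx, v in pairs]
--     return result
-- ===== Notes on version B (the rewrite author's own statement) =====
-- stated objective: alternative
-- what changed: B makes a single pass over the rows keeping a running per-column maximum (compared and updated per cell), instead of A's rescan of all earlier rows of the column for every cell.
import Mathlib
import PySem

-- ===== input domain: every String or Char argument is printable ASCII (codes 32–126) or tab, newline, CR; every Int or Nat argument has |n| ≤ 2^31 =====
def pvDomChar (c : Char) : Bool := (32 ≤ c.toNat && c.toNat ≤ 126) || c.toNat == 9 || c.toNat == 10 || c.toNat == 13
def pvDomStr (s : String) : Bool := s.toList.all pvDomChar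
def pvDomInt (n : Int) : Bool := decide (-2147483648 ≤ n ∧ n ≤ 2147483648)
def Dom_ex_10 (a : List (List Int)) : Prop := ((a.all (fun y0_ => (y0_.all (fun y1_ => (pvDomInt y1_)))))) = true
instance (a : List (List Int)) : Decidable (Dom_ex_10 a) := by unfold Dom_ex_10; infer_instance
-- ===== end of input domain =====

-- B replaces A's per-cell rescan of all earlier rows by a single pass keeping running per-column maxima (objective: alternative).


-- ===== PORT A =====
-- a[k][j] / a[i][j] via pyGetD: in range under Pre_ex_10 (the default is never read there);
-- the k-loop appends once and `break`s on the first hit, i.e. appends iff some k < i passes the test = `any`.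
def pvCondA (a : List (List Int)) (i j : Int) : Bool :=
  (PySem.List.pyRange 0 i 1).any (fun k =>
    decide (PySem.List.pyGetD (PySem.List.pyGetD a i []) j 0
              ≤ PySem.List.pyGetD (PySem.List.pyGetD a k []) j 0))

-- the body of A's outer loop: the j-loop for one row index i
def pvRowA (a : List (List Int)) (result : List (Int × Int)) (i : Int) : List (Int × Int) :=
  (PySem.List.pyRange 0 ((PySem.List.pyGetD a 0 []).length : Int) 1).foldl
    (fun result j => if pvCondA a i j then result ++ [(i, j)] else result) result

def ex_10 (a : List (List Int)) : List (Int × Int) :=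
  (PySem.List.pyRange 0 (a.length : Int) 1).foldl (pvRowA a) []

-- ===== PORT B =====
-- a[0] and a[i] via pyGetD: in range under Pre_ex_10 (the default is never read there).
-- the body of B's loop: state = (running column maxima, result so far)
def pvStepB (a : List (List Int)) (st : List Int × List (Int × Int)) (i : Int) :
    List Int × List (Int × Int) :=
  let pairs := st.1.zip (PySem.List.pyGetD a i [])
  (pairs.map (fun p => max p.1 p.2),
   st.2 ++ ((PySem.List.enumerate pairs 0).filter
              (fun q => decide (q.2.2 ≤ q.2.1))).map (fun q => (i, q.1)))

def ex_10_alt (a : List (List Int)) : List (Int × Int) :=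
  ((PySem.List.pyRange 1 (a.length : Int) 1).foldl (pvStepB a)
    (PySem.List.pyGetD a 0 [], [])).2

-- ===== PRECONDITION & SPEC =====
-- Pre_ excludes exactly the inputs where A raises IndexError: the empty list (a[0]) and
-- ragged inputs with some row shorter than the first row (a[i][j] / a[k][j]).
def Pre_ex_10 (a : List (List Int)) : Prop :=
  a ≠ [] ∧ ∀ r ∈ a, (a.headD []).length ≤ r.length
instance (a : List (List Int)) : Decidable (Pre_ex_10 a) := by unfold Pre_ex_10; infer_instance
def pvWitness_ex_10 : List (List Int) := [[1, 2], [2, 0], [0, 3]]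
def Spec_ex_10 (a : List (List Int)) (out : List (Int × Int)) : Prop := out = ex_10_alt a
instance (a : List (List Int)) (out : List (Int × Int)) : Decidable (Spec_ex_10 a out) := by unfold Spec_ex_10; infer_instance

-- ===== CLAIM (what is proved, stated in full; the proofs are below) =====
def Claim_equal_ex_10 : Prop := ∀ (a : List (List Int)), Dom_ex_10 a → Pre_ex_10 a → Spec_ex_10 a (ex_10 a)

-- ===== LEMMAS AND PROOFS =====

-- the loop invariant: `maxes` has one entry per column, and entry j is the running maximum of
-- column j over rows 0..c-1, characterised by "v ≤ maxes[j] ↔ some row k < c has v ≤ a[k][j]"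
def pvInv (a : List (List Int)) (c : Int) (maxes : List Int) : Prop :=
  maxes.length = (PySem.List.pyGetD a 0 []).length ∧
  ∀ j : Int, 0 ≤ j → j < (maxes.length : Int) → ∀ v : Int,
    (v ≤ PySem.List.pyGetD maxes j 0 ↔
      ∃ k : Int, 0 ≤ k ∧ k < c ∧ v ≤ PySem.List.pyGetD (PySem.List.pyGetD a k []) j 0)

lemma pvRowA_eq (a : List (List Int)) (result : List (Int × Int)) (i : Int) :
    pvRowA a result i = result ++
      ((PySem.List.pyRange 0 ((PySem.List.pyGetD a 0 []).length : Int) 1).filter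
        (pvCondA a i)).map (fun j => (i, j)) := by
  unfold pvRowA
  exact PySem.List.foldl_append_if (pvCondA a i) (fun j => (i, j)) _ _

-- the contribution of row c in B equals the contribution of row c in A, under the invariant
lemma pvStep_snd (a : List (List Int)) (maxes : List Int) (result : List (Int × Int)) (c : Int)
    (hrow : (PySem.List.pyGetD a 0 []).length ≤ (PySem.List.pyGetD a c []).length)
    (hinv : pvInv a c maxes) :
    (pvStepB a (maxes, result) c).2 = pvRowA a result c := by
  obtain ⟨hlen, hmax⟩ := hinv
  rw [pvRowA_eq]
  simp only [pvStepB]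
  congr 1
  have hplen : (maxes.zip (PySem.List.pyGetD a c [])).length
      = (PySem.List.pyGetD a 0 []).length := by
    rw [List.length_zip, hlen]; omega
  rw [PySem.List.enumerate_eq_map_pyRange (maxes.zip (PySem.List.pyGetD a c [])) (0, 0),
    List.filter_map, List.map_map]
  have hlenI : PySem.List.len (maxes.zip (PySem.List.pyGetD a c []))
      = ((PySem.List.pyGetD a 0 []).length : Int) := by
    simp [pysem, hplen]
  rw [hlenI]
  have hfil : ∀ j ∈ PySem.List.pyRange 0 ((PySem.List.pyGetD a 0 []).length : Int) 1,
      ((fun q => decide (q.2.2 ≤ q.2.1)) ∘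
        (fun j => (j, PySem.List.pyGetD (maxes.zip (PySem.List.pyGetD a c [])) j (0, 0)))) j
        = pvCondA a c j := by
    intro j hj
    rw [PySem.List.mem_pyRange_one] at hj
    have hjp : (PySem.List.pyGetD (maxes.zip (PySem.List.pyGetD a c [])) j (0, 0))
        = (maxes[j.toNat]'(by omega), (PySem.List.pyGetD a c [])[j.toNat]'(by omega)) := by
      rw [PySem.List.pyGetD_eq_getElem _ _ hj.1 (by omega)]
      exact List.getElem_zip
    have hrj : PySem.List.pyGetD (PySem.List.pyGetD a c []) j 0
        = (PySem.List.pyGetD a c [])[j.toNat]'(by omega) :=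
      PySem.List.pyGetD_eq_getElem _ _ hj.1 (by omega)
    have hmj : PySem.List.pyGetD maxes j 0 = maxes[j.toNat]'(by omega) :=
      PySem.List.pyGetD_eq_getElem _ _ hj.1 (by omega)
    simp only [Function.comp_apply, hjp]
    unfold pvCondA
    rw [List.any_eq, decide_eq_decide]
    simp only [PySem.List.mem_pyRange_one, decide_eq_true_eq]
    rw [← hrj, ← hmj]
    constructor
    · intro h
      obtain ⟨k, hk0, hkc, hk⟩ := (hmax j hj.1 (by omega) _).mp h
      exact ⟨k, ⟨hk0, hkc⟩, hk⟩
    · rintro ⟨k, ⟨hk0, hkc⟩, hk⟩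
      exact (hmax j hj.1 (by omega) _).mpr ⟨k, hk0, hkc, hk⟩
  rw [List.filter_congr hfil]
  exact List.map_congr_left fun x hx => rfl

-- the invariant is preserved by B's step
lemma pvStep_fst (a : List (List Int)) (maxes : List Int) (result : List (Int × Int)) (c : Int)
    (hc0 : 0 ≤ c) (hcn : c < (a.length : Int))
    (hrow : (PySem.List.pyGetD a 0 []).length ≤ (PySem.List.pyGetD a c []).length)
    (hinv : pvInv a c maxes) :
    pvInv a (c + 1) (pvStepB a (maxes, result) c).1 := by
  obtain ⟨hlen, hmax⟩ := hinv
  have hplen : (maxes.zip (PySem.List.pyGetD a c [])).length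
      = (PySem.List.pyGetD a 0 []).length := by
    rw [List.length_zip, hlen]; omega
  constructor
  · simp only [pvStepB, List.length_map]
    exact hplen
  · intro j hj0 hjlt v
    simp only [pvStepB, List.length_map, hplen] at hjlt ⊢
    have hget : PySem.List.pyGetD
        ((maxes.zip (PySem.List.pyGetD a c [])).map (fun p => max p.1 p.2)) j 0
        = max (maxes[j.toNat]'(by omega)) ((PySem.List.pyGetD a c [])[j.toNat]'(by omega)) := by
      rw [PySem.List.pyGetD_eq_getElem _ _ hj0 (by simp [hplen]; omega)]
      rw [List.getElem_map, List.getElem_zip]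
    have hrj : PySem.List.pyGetD (PySem.List.pyGetD a c []) j 0
        = (PySem.List.pyGetD a c [])[j.toNat]'(by omega) :=
      PySem.List.pyGetD_eq_getElem _ _ hj0 (by omega)
    have hmj : PySem.List.pyGetD maxes j 0 = maxes[j.toNat]'(by omega) :=
      PySem.List.pyGetD_eq_getElem _ _ hj0 (by omega)
    rw [hget, le_max_iff, ← hrj, ← hmj]
    constructor
    · rintro (h | h)
      · obtain ⟨k, hk0, hkc, hk⟩ := (hmax j hj0 (by omega) _).mp h
        exact ⟨k, hk0, by omega, hk⟩
      · exact ⟨c, hc0, by omega, h⟩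
    · rintro ⟨k, hk0, hkc, hk⟩
      by_cases hkc' : k < c
      · exact Or.inl ((hmax j hj0 (by omega) _).mpr ⟨k, hk0, hkc', hk⟩)
      · have : k = c := by omega
        subst this
        exact Or.inr hk

lemma pvInv_base (a : List (List Int)) : pvInv a 1 (PySem.List.pyGetD a 0 []) := by
  refine ⟨rfl, fun j hj0 hjlt v => ?_⟩
  constructor
  · intro h
    exact ⟨0, le_refl 0, by omega, h⟩
  · rintro ⟨k, hk0, hk1, hk⟩
    have : k = 0 := by omega
    subst this
    exact hk

lemma pvMain (a : List (List Int))
    (hP : ∀ r ∈ a, (PySem.List.pyGetD a 0 []).length ≤ r.length) :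
    ∀ (t : Nat) (c : Int), c = (a.length : Int) - t → 1 ≤ c →
    ∀ (maxes : List Int) (result : List (Int × Int)), pvInv a c maxes →
    ((PySem.List.pyRange c (a.length : Int) 1).foldl (pvStepB a) (maxes, result)).2
      = (PySem.List.pyRange c (a.length : Int) 1).foldl (pvRowA a) result := by
  intro t
  induction t with
  | zero =>
    intro c hc _ maxes result _
    rw [PySem.List.pyRange_one_eq_nil (by omega)]
    rfl
  | succ t ih =>
    intro c hc hc1 maxes result hinv
    have hcn : c < (a.length : Int) := by omega
    have hrow : (PySem.List.pyGetD a 0 []).length ≤ (PySem.List.pyGetD a c []).length :=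
      hP _ (PySem.List.pyGetD_mem a [] (by simp only [PySem.Raise.InRange]; omega))
    rw [PySem.List.pyRange_one_cons hcn]
    simp only [List.foldl_cons]
    have hsnd := pvStep_snd a maxes result c hrow hinv
    have hfst := pvStep_fst a maxes result c (by omega) hcn hrow hinv
    have : pvStepB a (maxes, result) c = ((pvStepB a (maxes, result) c).1, pvRowA a result c) := by
      rw [← hsnd]
    rw [this, ih (c + 1) (by omega) (by omega) _ _ hfst]

theorem ex_10_spec : Claim_equal_ex_10 := by
  intro a _ hpre
  obtain ⟨hne, hall⟩ := hpre
  have hn : 1 ≤ (a.length : Int) := by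
    have : a.length ≠ 0 := fun h => hne (List.length_eq_zero_iff.mp h)
    omega
  have hhead : a.headD [] = PySem.List.pyGetD a 0 [] := by
    cases a with
    | nil => rfl
    | cons x xs => simp [PySem.List.pyGetD_zero_cons]
  unfold Spec_ex_10 ex_10 ex_10_alt
  rw [PySem.List.pyRange_one_cons (by omega)]
  simp only [List.foldl_cons, zero_add]
  have h0 : pvRowA a [] 0 = [] := by
    rw [pvRowA_eq]
    have : ∀ j, pvCondA a 0 j = false := by
      intro j
      unfold pvCondA
      rw [PySem.List.pyRange_one_eq_nil (by omega)]
      rfl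
    have hnil : (PySem.List.pyRange 0 ((PySem.List.pyGetD a 0 []).length : Int) 1).filter
        (pvCondA a 0) = [] :=
      List.filter_eq_nil_iff.mpr (fun j _ => by rw [this j]; simp)
    rw [hnil]
    rfl
  rw [h0]
  exact (pvMain a (fun r hr => hhead ▸ hall r hr) (a.length - 1) 1 (by omega) le_rfl
    (PySem.List.pyGetD a 0 []) [] (pvInv_base a)).symm
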